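-- pv_equiv track=rewrite | github.com/FocSon/StickHeroBot | StickHero.py | nb_pix_btw
-- ===== SOURCE A (Python) =====
-- def nb_pix_btw(last_line):
--     flag = False
--     nb_col = 0
--     nb_pix = 0
--
--     for rgb in last_line[2:]:
--         if nb_col < 2:
--             if rgb[0] == 0 and rgb[1] == 0 and rgb[2] == 0:
--                 if flag:
--                     continue
--                 else:
--                     flag = not flag
--                     nb_col += 1
--
--             elif nb_col != 0:
--                 nb_pix += 1
--                 if flag:
--                     flag = not flag
--         else:
--             break
--
--     return nb_pix
-- ===== SOURCE B (Python) =====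
-- def _is_black(rgb):
--     return rgb[0] == 0 and rgb[1] == 0 and rgb[2] == 0
--
-- def nb_pix_btw(last_line):
--     px = last_line[2:]
--     n = len(px)
--     i = 0
--     # phase 1: advance to the first black pixel
--     while i < n and not _is_black(px[i]):
--         i += 1
--     # phase 2: advance past the first black column
--     while i < n and _is_black(px[i]):
--         i += 1
--     # phase 3: count non-black pixels until the next black column (or end)
--     count = 0
--     while i + count < n and not _is_black(px[i + count]):
--         count += 1
--     return count
-- ===== Notes on version B (the rewrite author's own statement) =====
-- stated objective: simpler
-- what changed: Replaced the flag/nb_col state machine with a three-phase scan: skip to the first black pixel, skip the black run, then count the following non-black run.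
import Mathlib
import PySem

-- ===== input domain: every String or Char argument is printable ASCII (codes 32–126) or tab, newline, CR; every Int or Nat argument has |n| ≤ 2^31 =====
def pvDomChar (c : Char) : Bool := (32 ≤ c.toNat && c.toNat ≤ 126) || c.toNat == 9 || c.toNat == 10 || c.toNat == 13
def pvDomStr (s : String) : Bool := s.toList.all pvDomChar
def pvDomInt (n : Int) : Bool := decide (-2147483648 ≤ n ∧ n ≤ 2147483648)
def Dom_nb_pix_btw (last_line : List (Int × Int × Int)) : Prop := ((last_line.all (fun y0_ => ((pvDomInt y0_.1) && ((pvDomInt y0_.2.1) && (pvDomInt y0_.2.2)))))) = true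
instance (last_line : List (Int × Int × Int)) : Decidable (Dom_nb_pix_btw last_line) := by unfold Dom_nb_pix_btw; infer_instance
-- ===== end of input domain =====

-- ===== PORT A =====
-- B replaces A's flag/nb_col state machine by a three-phase scan (skip, skip black run, count); simpler decomposition, same cost.
-- loop of A: state (flag, nb_col, nb_pix), with the 'break' at nb_col ≥ 2
def pvNbA : List (Int × Int × Int) → Bool → Int → Int → Int
  | [], _, _, nb_pix => nb_pix
  | rgb :: rest, flag, nb_col, nb_pix =>
    if nb_col < 2 then
      if rgb.1 == 0 && rgb.2.1 == 0 && rgb.2.2 == 0 then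
        if flag then pvNbA rest flag nb_col nb_pix
        else pvNbA rest (!flag) (nb_col + 1) nb_pix
      else if nb_col ≠ 0 then
        pvNbA rest (if flag then !flag else flag) nb_col (nb_pix + 1)
      else pvNbA rest flag nb_col nb_pix
    else nb_pix

def nb_pix_btw (last_line : List (Int × Int × Int)) : Int :=
  pvNbA (PySem.List.slice last_line (some 2) none) false 0 0

-- ===== PORT B =====
def pvIsBlack (rgb : Int × Int × Int) : Bool :=
  rgb.1 == 0 && rgb.2.1 == 0 && rgb.2.2 == 0

-- phase 1: advance to the first black pixel
def pvSkipNB : List (Int × Int × Int) → List (Int × Int × Int)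
  | [] => []
  | h :: t => if pvIsBlack h then h :: t else pvSkipNB t

-- phase 2: advance past the first black column
def pvSkipB : List (Int × Int × Int) → List (Int × Int × Int)
  | [] => []
  | h :: t => if pvIsBlack h then pvSkipB t else h :: t

-- phase 3: count the leading non-black run
def pvCntNB : List (Int × Int × Int) → Int
  | [] => 0
  | h :: t => if pvIsBlack h then 0 else 1 + pvCntNB t

def nb_pix_btw_alt (last_line : List (Int × Int × Int)) : Int :=
  pvCntNB (pvSkipB (pvSkipNB (PySem.List.slice last_line (some 2) none)))

-- ===== PRECONDITION & SPEC =====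
def Spec_nb_pix_btw (last_line : List (Int × Int × Int)) (out : Int) : Prop := out = nb_pix_btw_alt last_line
instance (last_line : List (Int × Int × Int)) (out : Int) : Decidable (Spec_nb_pix_btw last_line out) := by unfold Spec_nb_pix_btw; infer_instance

-- ===== CLAIM (what is proved, stated in full; the proofs are below) =====
def Claim_equal_nb_pix_btw : Prop := ∀ (last_line : List (Int × Int × Int)), Dom_nb_pix_btw last_line → Spec_nb_pix_btw last_line (nb_pix_btw last_line)

-- ===== LEMMAS AND PROOFS =====

-- once nb_col = 2, A returns nb_pix immediately
lemma pvNbA_two (l : List (Int × Int × Int)) (flag : Bool) (pix : Int) :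
    pvNbA l flag 2 pix = pix := by
  cases l <;> simp [pvNbA]

-- counting phase: flag = false, nb_col = 1
lemma pvNbA_count (l : List (Int × Int × Int)) (pix : Int) :
    pvNbA l false 1 pix = pix + pvCntNB l := by
  induction l generalizing pix with
  | nil => simp [pvNbA, pvCntNB]
  | cons h t ih =>
    by_cases hb : (h.1 == 0 && h.2.1 == 0 && h.2.2 == 0) = true
    · simp [pvNbA, pvCntNB, pvIsBlack, hb, pvNbA_two]
    · rw [Bool.not_eq_true] at hb
      simp [pvNbA, pvCntNB, pvIsBlack, hb, ih]
      ring

-- inside the first black column: flag = true, nb_col = 1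
lemma pvNbA_black (l : List (Int × Int × Int)) (pix : Int) :
    pvNbA l true 1 pix = pix + pvCntNB (pvSkipB l) := by
  induction l generalizing pix with
  | nil => simp [pvNbA, pvSkipB, pvCntNB]
  | cons h t ih =>
    by_cases hb : (h.1 == 0 && h.2.1 == 0 && h.2.2 == 0) = true
    · simp [pvNbA, pvSkipB, pvIsBlack, hb, ih]
    · rw [Bool.not_eq_true] at hb
      simp [pvNbA, pvSkipB, pvCntNB, pvIsBlack, hb, pvNbA_count]
      ring

-- whole loop = three-phase scan
lemma pvNbA_main (l : List (Int × Int × Int)) :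
    pvNbA l false 0 0 = pvCntNB (pvSkipB (pvSkipNB l)) := by
  induction l with
  | nil => simp [pvNbA, pvSkipNB, pvSkipB, pvCntNB]
  | cons h t ih =>
    by_cases hb : (h.1 == 0 && h.2.1 == 0 && h.2.2 == 0) = true
    · simp [pvNbA, pvSkipNB, pvSkipB, pvIsBlack, hb, pvNbA_black]
    · rw [Bool.not_eq_true] at hb
      simp [pvNbA, pvSkipNB, pvIsBlack, hb, ih]

-- ===== VERDICT (by name: the statement is the Claim_ definition above) =====
theorem nb_pix_btw_spec : Claim_equal_nb_pix_btw := by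
  intro l _
  unfold Spec_nb_pix_btw nb_pix_btw nb_pix_btw_alt
  exact pvNbA_main _
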